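-- pv_equiv track=rewrite | github.com/bnorris823/Bioinformatics-coding-problems | Overlap_Graphs/OverlapGraphs.py | graphPairs
-- ===== SOURCE A (Python) =====
-- def graphPairs(seqDict, k):
--     plist = []
--     for key in seqDict:
--         suf = seqDict[key][-k:]
--         for l in seqDict:
--             pair = [key]
--             pre = seqDict[l][:k]
--             if ((suf == pre) & (key != l)):
--                 pair.append(l)
--             if(len(pair) > 1):
--                 plist.append(pair)
--     return plist
-- ===== SOURCE B (Python) =====
-- def graphPairs(seqDict, k):
--     by_prefix = {}
--     for name, seq in seqDict.items():
--         by_prefix.setdefault(seq[:k], []).append(name)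
--     plist = []
--     for name, seq in seqDict.items():
--         for other in by_prefix.get(seq[-k:], []):
--             if other != name:
--                 plist.append([name, other])
--     return plist
-- ===== Notes on version B (the rewrite author's own statement) =====
-- stated objective: faster
-- what changed: B builds a dict mapping each k-prefix to the names carrying it in one pass, then looks each sequence's k-suffix up once, replacing A's nested all-pairs scan.
import Mathlib
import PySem

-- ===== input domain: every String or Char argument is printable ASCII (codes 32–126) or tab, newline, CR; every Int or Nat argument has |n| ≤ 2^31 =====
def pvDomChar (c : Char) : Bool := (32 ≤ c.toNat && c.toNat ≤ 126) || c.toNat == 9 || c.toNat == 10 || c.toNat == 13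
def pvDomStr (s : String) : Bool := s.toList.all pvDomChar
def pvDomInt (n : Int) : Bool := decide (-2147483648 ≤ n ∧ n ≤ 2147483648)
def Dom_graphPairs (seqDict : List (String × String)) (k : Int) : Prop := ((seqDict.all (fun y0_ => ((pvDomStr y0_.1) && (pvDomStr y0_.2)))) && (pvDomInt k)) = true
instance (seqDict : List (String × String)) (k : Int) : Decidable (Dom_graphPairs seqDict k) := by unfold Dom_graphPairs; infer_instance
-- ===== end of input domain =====

-- B replaces A's nested scan over all key pairs by a dict keyed on each k-prefix, looked up once per suffix (objective: faster).

-- ===== PORT A =====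
def graphPairs (seqDict : List (String × String)) (k : Int) : List (List String) :=
  -- the Python dict argument, reconstructed from the association list (insertion order, overwrite in place)
  let d := seqDict.foldl (fun d p => d.insert p.1 p.2) PySem.Dict.empty
  d.keys.foldl (fun plist key =>
    let suf := PySem.Str.slice (d.getD key "") (some (-k)) none       -- seqDict[key][-k:]
    d.keys.foldl (fun plist l =>
      let pair := [key]
      let pre := PySem.Str.slice (d.getD l "") none (some k)          -- seqDict[l][:k]
      let pair := if (suf == pre) && (key != l) then pair ++ [l] else pair
      if pair.length > 1 then plist ++ [pair] else plist) plist) []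

-- ===== PORT B =====
def graphPairs_alt (seqDict : List (String × String)) (k : Int) : List (List String) :=
  let d := seqDict.foldl (fun d p => d.insert p.1 p.2) PySem.Dict.empty
  -- by_prefix.setdefault(seq[:k], []).append(name)
  let byPrefix := d.items.foldl
    (fun bp p => bp.modify (PySem.Str.slice p.2 none (some k)) [] (fun x => x ++ [p.1]))
    PySem.Dict.empty
  d.items.foldl (fun plist p =>
    plist ++ ((byPrefix.getD (PySem.Str.slice p.2 (some (-k)) none) []).filter
                (fun other => other != p.1)).map (fun other => [p.1, other])) []

-- ===== PRECONDITION & SPEC =====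
def Spec_graphPairs (seqDict : List (String × String)) (k : Int) (out : List (List String)) : Prop := out = graphPairs_alt seqDict k
instance (seqDict : List (String × String)) (k : Int) (out : List (List String)) : Decidable (Spec_graphPairs seqDict k out) := by unfold Spec_graphPairs; infer_instance

-- ===== CLAIM (what is proved, stated in full; the proofs are below) =====
def Claim_equal_graphPairs : Prop := ∀ (seqDict : List (String × String)) (k : Int), Dom_graphPairs seqDict k → Spec_graphPairs seqDict k (graphPairs seqDict k)

-- ===== LEMMAS AND PROOFS =====

-- A's inner loop collects exactly [key, l] for the matching keys l, in key order.
theorem graphPairs_innerA (keys : List String) (key suf : String) (pre : String → String)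
    (acc : List (List String)) :
    keys.foldl (fun plist l =>
      let pair := [key]
      let pair := if (suf == pre l) && (key != l) then pair ++ [l] else pair
      if pair.length > 1 then plist ++ [pair] else plist) acc
    = acc ++ (keys.filter (fun l => (suf == pre l) && (key != l))).map (fun l => [key, l]) := by
  have hbody : (fun (plist : List (List String)) l =>
      let pair := [key]
      let pair := if (suf == pre l) && (key != l) then pair ++ [l] else pair
      if pair.length > 1 then plist ++ [pair] else plist)
    = fun plist l => if ((suf == pre l) && (key != l)) = true then plist ++ [[key, l]] else plist := by
    funext plist l
    by_cases h : ((suf == pre l) && (key != l)) = true <;> simp [h]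
  rw [hbody, PySem.List.foldl_append_if]

-- both loop nests, over an arbitrary dict with distinct keys
theorem graphPairs_core (d : PySem.Dict String String) (hnd : d.keys.Nodup) (k : Int) :
    d.keys.foldl (fun plist key =>
       let suf := PySem.Str.slice (d.getD key "") (some (-k)) none
       d.keys.foldl (fun plist l =>
         let pair := [key]
         let pre := PySem.Str.slice (d.getD l "") none (some k)
         let pair := if (suf == pre) && (key != l) then pair ++ [l] else pair
         if pair.length > 1 then plist ++ [pair] else plist) plist) []
  = d.items.foldl (fun plist p =>
       plist ++ (((d.items.foldl
           (fun bp p => bp.modify (PySem.Str.slice p.2 none (some k)) [] (fun x => x ++ [p.1]))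
           PySem.Dict.empty).getD (PySem.Str.slice p.2 (some (-k)) none) []).filter
                   (fun other => other != p.1)).map (fun other => [p.1, other])) [] := by
  have hbucket : ∀ c, (d.items.foldl
       (fun bp p => bp.modify (PySem.Str.slice p.2 none (some k)) [] (fun x => x ++ [p.1]))
       PySem.Dict.empty).getD c []
      = d.keys.filter (fun l => PySem.Str.slice (d.getD l "") none (some k) == c) := by
    intro c
    have hmap : d.items.foldl
         (fun bp p => bp.modify (PySem.Str.slice p.2 none (some k)) [] (fun x => x ++ [p.1]))
         PySem.Dict.empty
       = (d.items.map (fun q : String × String => (PySem.Str.slice q.2 none (some k), q.1))).foldl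
           (fun bp p => bp.modify p.1 [] (fun x => x ++ [p.2])) PySem.Dict.empty :=
      by rw [List.foldl_map]
    rw [hmap, PySem.Dict.getD_foldl_modify_append, PySem.Dict.items_eq_map_keys d hnd ""]
    simp [List.filter_map, List.map_map, Function.comp_def]
  have hA : (fun (plist : List (List String)) key =>
      let suf := PySem.Str.slice (d.getD key "") (some (-k)) none
      d.keys.foldl (fun plist l =>
        let pair := [key]
        let pre := PySem.Str.slice (d.getD l "") none (some k)
        let pair := if (suf == pre) && (key != l) then pair ++ [l] else pair
        if pair.length > 1 then plist ++ [pair] else plist) plist)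
    = (fun plist key => plist ++
        (d.keys.filter (fun l => (PySem.Str.slice (d.getD key "") (some (-k)) none == PySem.Str.slice (d.getD l "") none (some k)) && (key != l))).map
          (fun l => [key, l])) :=
    funext fun plist => funext fun key =>
      graphPairs_innerA d.keys key _ (fun l => PySem.Str.slice (d.getD l "") none (some k)) plist
  rw [hA, PySem.List.foldl_append_eq_flatMap]
  have hB : (fun (plist : List (List String)) (p : String × String) =>
      plist ++ (((d.items.foldl
           (fun bp p => bp.modify (PySem.Str.slice p.2 none (some k)) [] (fun x => x ++ [p.1]))
           PySem.Dict.empty).getD (PySem.Str.slice p.2 (some (-k)) none) []).filter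
                   (fun other => other != p.1)).map (fun other => [p.1, other]))
    = (fun plist p => plist ++
        ((d.keys.filter (fun l => PySem.Str.slice (d.getD l "") none (some k) == PySem.Str.slice p.2 (some (-k)) none)).filter
          (fun other => other != p.1)).map (fun other => [p.1, other])) :=
    funext fun plist => funext fun p => by rw [hbucket]
  rw [hB, PySem.List.foldl_append_eq_flatMap, PySem.Dict.items_eq_map_keys d hnd "", List.flatMap_map]
  simp only [List.nil_append, List.filter_filter]
  apply List.flatMap_congr
  intro key hk
  apply congrArg
  apply List.filter_congr
  intro l hl
  simp [bne, Bool.beq_comm, Bool.and_comm]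

-- ===== VERDICT (by name: the statement is the Claim_ definition above) =====
theorem graphPairs_spec : Claim_equal_graphPairs := by
  intro seqDict k _
  have hnd : ((seqDict.foldl (fun d p => d.insert p.1 p.2) PySem.Dict.empty) :
      PySem.Dict String String).keys.Nodup :=
    PySem.Dict.nodup_keys_foldl_insert_key seqDict (·.1) (fun _ p => p.2) _
      (by simp [PySem.Dict.empty, PySem.Dict.keys])
  unfold Spec_graphPairs graphPairs graphPairs_alt
  simp only []
  exact graphPairs_core _ hnd k
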